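-- pv_equiv track=rewrite | github.com/andrewisbs/bookbot | main.py | words_by_first
-- ===== SOURCE A (Python) =====
-- def words_by_first(input_text):
--     word_dict = {}
--     text = input_text.lower()
--     for word in text:
--
--         try:
--             value = word_dict[word[0]]
--             word_dict[word[0]] = value + 1
--         except:
--             word_dict[word[0]] = 1
--     return word_dict
-- ===== SOURCE B (Python) =====
-- def words_by_first(input_text):
--     text = input_text.lower()
--     return {c: text.count(c) for c in dict.fromkeys(text)}
-- ===== Notes on version B (the rewrite author's own statement) =====
-- stated objective: faster
-- what changed: Instead of hashing each character into a dict on the fly with try/except, B lowercases once, takes the distinct characters in first-occurrence order (dict.fromkeys) and maps each to text.count(c); the per-character Python loop disappears into C-level primitives.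
import Mathlib
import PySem

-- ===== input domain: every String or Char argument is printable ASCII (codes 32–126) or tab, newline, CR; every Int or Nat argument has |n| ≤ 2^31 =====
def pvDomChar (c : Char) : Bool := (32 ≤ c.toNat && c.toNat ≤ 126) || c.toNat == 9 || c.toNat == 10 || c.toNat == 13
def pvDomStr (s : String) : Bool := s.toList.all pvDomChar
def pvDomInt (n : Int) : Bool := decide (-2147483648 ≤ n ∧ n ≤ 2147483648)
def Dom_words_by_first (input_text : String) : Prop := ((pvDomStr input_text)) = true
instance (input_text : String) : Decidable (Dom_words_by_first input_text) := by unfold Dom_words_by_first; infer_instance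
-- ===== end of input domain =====

-- B replaces A's on-the-fly try/except dict counting by dedup-then-count-per-key (different decomposition; timing run measured B faster).

-- ===== PORT A =====
-- iterating a Python str yields one-character strings; word[0] of such a word is that same
-- one-character string, so the key word[0] is ported as String.ofList [c]
def words_by_first (input_text : String) : List (String × Int) :=
  let text := PySem.Str.lower input_text
  (text.toList.foldl (fun word_dict c =>
      match word_dict.get? (String.ofList [c]) with
      | some value => word_dict.insert (String.ofList [c]) (value + 1)
      | none       => word_dict.insert (String.ofList [c]) 1)
    (PySem.Dict.empty : PySem.Dict String Int)).items

-- ===== PORT B =====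
def words_by_first_alt (input_text : String) : List (String × Int) :=
  let text := PySem.Str.lower input_text
  (PySem.List.dedup text.toList).map
    (fun c => (String.ofList [c], (text.toList.count c : Int)))

-- ===== PRECONDITION & SPEC =====
def Spec_words_by_first (input_text : String) (out : List (String × Int)) : Prop := out = words_by_first_alt input_text
instance (input_text : String) (out : List (String × Int)) : Decidable (Spec_words_by_first input_text out) := by unfold Spec_words_by_first; infer_instance

-- ===== CLAIM (what is proved, stated in full; the proofs are below) =====
def Claim_equal_words_by_first : Prop := ∀ (input_text : String), Dom_words_by_first input_text → Spec_words_by_first input_text (words_by_first input_text)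

-- ===== LEMMAS AND PROOFS =====

theorem key_inj : Function.Injective (fun c : Char => String.ofList [c]) := by
  intro a b h
  have := congrArg String.toList h
  simp only [String.toList_ofList] at this
  simpa using this

theorem foldl_add_map (cs : List Char) (t : List Char) :
    List.foldl PySem.Set.add (t.map (fun c => String.ofList [c])) (cs.map (fun c => String.ofList [c]))
      = (List.foldl PySem.Set.add t cs).map (fun c => String.ofList [c]) := by
  induction cs generalizing t with
  | nil => simp
  | cons c cs ih =>
    simp only [List.map_cons, List.foldl_cons]
    have hc : PySem.Set.contains (t.map (fun c : Char => String.ofList [c])) (String.ofList [c])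
        = PySem.Set.contains t c := by
      simp only [PySem.Set.contains]
      simp [List.mem_map, key_inj.eq_iff]
    rw [show PySem.Set.add (t.map (fun c : Char => String.ofList [c])) (String.ofList [c])
        = (PySem.Set.add t c).map (fun c : Char => String.ofList [c]) from ?_]
    · exact ih _
    · simp only [PySem.Set.add, hc]
      split <;> simp

theorem dedup_map (cs : List Char) :
    PySem.List.dedup (cs.map (fun c => String.ofList [c]))
      = (PySem.List.dedup cs).map (fun c => String.ofList [c]) := by
  simpa [PySem.List.dedup, PySem.Set.ofList, PySem.Set.empty] using foldl_add_map cs []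

-- A's loop body (try/except lookup-then-insert) written as one insert
theorem body_eq (d : PySem.Dict String Int) (c : Char) :
    (match d.get? (String.ofList [c]) with
      | some value => d.insert (String.ofList [c]) (value + 1)
      | none       => d.insert (String.ofList [c]) 1)
      = d.insert (String.ofList [c]) (d.getD (String.ofList [c]) 0 + 1) := by
  rcases h : d.get? (String.ofList [c]) with _ | v <;>
    simp [PySem.Dict.getD_eq_get?_getD, h]

-- ===== VERDICT (by name: the statement is the Claim_ definition above) =====
theorem words_by_first_spec : Claim_equal_words_by_first := by
  intro input_text _
  unfold Spec_words_by_first words_by_first words_by_first_alt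
  simp only [funext fun d => funext fun c => body_eq d c]
  generalize (PySem.Str.lower input_text).toList = cs
  rw [show List.foldl (fun (d : PySem.Dict String Int) c =>
        d.insert (String.ofList [c]) (d.getD (String.ofList [c]) 0 + 1)) PySem.Dict.empty cs
      = PySem.Dict.counter (cs.map fun c => String.ofList [c]) from by
        rw [← PySem.Dict.foldl_insert_getD_add_one_eq_counter, List.foldl_map]]
  rw [PySem.Dict.items_counter]
  rw [show PySem.Set.ofList (cs.map fun c => String.ofList [c])
      = PySem.List.dedup (cs.map fun c => String.ofList [c]) from rfl]
  rw [dedup_map]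
  rw [List.map_map]
  refine List.map_congr_left fun c _ => ?_
  simp [List.count_map_of_injective _ _ key_inj]
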